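-- pv_equiv track=rewrite | github.com/aykutalpgurler/college-projects | IntroductionToProgramming_Python/Assignment4/Assignment4.py | listPOSITIONS
-- ===== SOURCE A (Python) =====
-- def listPOSITIONS(positionsDict):
-- 	#Function which returns dictionary with values of lists of positions for Carrier, Destroyer and Submarine ships.
-- 	shipDict={"Carrier":[],"Battleship1":[],"Battleship2":[],"Destroyer":[],"Submarine":[],"PatrolBoat1":[],"PatrolBoat2":[],"PatrolBoat3":[],"PatrolBoat4":[]}
-- 	for anahtar in positionsDict:
-- 		for letter in positionsDict[anahtar].keys():
-- 			if letter == "C":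
-- 				shipDict["Carrier"]+=[anahtar]
-- 			elif letter == "D":
-- 				shipDict["Destroyer"]+=[anahtar]
-- 			elif letter == "S":
-- 				shipDict["Submarine"]+=[anahtar]
-- 	return shipDict
-- ===== SOURCE B (Python) =====
-- def listPOSITIONS(positionsDict):
--     # Pre-built 9-key result; three independent filtering passes, one per ship letter,
--     # testing dict-key membership directly instead of categorizing letter by letter.
--     return {
--         "Carrier": [k for k, v in positionsDict.items() if "C" in v],
--         "Battleship1": [],
--         "Battleship2": [],
--         "Destroyer": [k for k, v in positionsDict.items() if "D" in v],
--         "Submarine": [k for k, v in positionsDict.items() if "S" in v],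
--         "PatrolBoat1": [],
--         "PatrolBoat2": [],
--         "PatrolBoat3": [],
--         "PatrolBoat4": [],
--     }
-- ===== Notes on version B (the rewrite author's own statement) =====
-- stated objective: alternative
-- what changed: Replaces A's single mutating pass (iterate every inner key, branch per letter, append into a preset dict) with a literal 9-key dict whose three active lists are built by three independent filtering comprehensions testing key membership; Pre_ only excludes association lists with duplicate outer or inner keys, which do not represent Python dicts.
import Mathlib
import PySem

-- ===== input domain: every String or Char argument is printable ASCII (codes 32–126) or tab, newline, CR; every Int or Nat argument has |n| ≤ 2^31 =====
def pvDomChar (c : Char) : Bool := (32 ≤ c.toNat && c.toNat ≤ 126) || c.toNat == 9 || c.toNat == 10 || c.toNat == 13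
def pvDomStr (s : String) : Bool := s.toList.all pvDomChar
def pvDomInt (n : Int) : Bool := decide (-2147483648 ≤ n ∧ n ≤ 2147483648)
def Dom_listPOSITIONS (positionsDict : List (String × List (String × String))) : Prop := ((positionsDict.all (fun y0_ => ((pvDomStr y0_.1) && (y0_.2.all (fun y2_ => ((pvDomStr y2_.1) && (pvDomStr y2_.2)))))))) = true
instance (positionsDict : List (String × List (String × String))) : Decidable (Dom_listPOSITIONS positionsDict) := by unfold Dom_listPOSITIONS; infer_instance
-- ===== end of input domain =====

-- B builds the 9-key result directly, with three independent filtering passes (one per ship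
-- letter) instead of A's single categorizing pass that appends letter by letter; same cost class.


-- ===== PORT A =====
-- shipDict[key] += [x]  (shipDict's keys are fixed; the matching entry gets x appended)
def pvAddTo (sd : List (String × List String)) (key : String) (x : String) : List (String × List String) :=
  sd.map (fun p => if p.1 == key then (p.1, p.2 ++ [x]) else p)

-- the inner loop body: branch on the letter, append anahtar to the matching ship's list
def pvStep (anahtar : String) (sd : List (String × List String)) (letter : String) :
    List (String × List String) :=
  if letter == "C" then pvAddTo sd "Carrier" anahtar
  else if letter == "D" then pvAddTo sd "Destroyer" anahtar
  else if letter == "S" then pvAddTo sd "Submarine" anahtar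
  else sd

-- for anahtar in positionsDict: for letter in positionsDict[anahtar].keys(): …
-- (under the assoc-list dict convention the pair iterated IS (anahtar, inner dict))
def listPOSITIONS (positionsDict : List (String × List (String × String))) : List (String × List String) :=
  positionsDict.foldl
    (fun sd kv => (kv.2.map Prod.fst).foldl (pvStep kv.1) sd)
    [("Carrier", []), ("Battleship1", []), ("Battleship2", []), ("Destroyer", []),
     ("Submarine", []), ("PatrolBoat1", []), ("PatrolBoat2", []), ("PatrolBoat3", []),
     ("PatrolBoat4", [])]

-- ===== PORT B =====
-- "c" in v  (key membership in the inner dict)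
def pvHasKey (v : List (String × String)) (c : String) : Bool := v.any (fun p => p.1 == c)

def listPOSITIONS_alt (positionsDict : List (String × List (String × String))) : List (String × List String) :=
  [("Carrier", (positionsDict.filter (fun kv => pvHasKey kv.2 "C")).map Prod.fst),
   ("Battleship1", []),
   ("Battleship2", []),
   ("Destroyer", (positionsDict.filter (fun kv => pvHasKey kv.2 "D")).map Prod.fst),
   ("Submarine", (positionsDict.filter (fun kv => pvHasKey kv.2 "S")).map Prod.fst),
   ("PatrolBoat1", []),
   ("PatrolBoat2", []),
   ("PatrolBoat3", []),
   ("PatrolBoat4", [])]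

-- ===== PRECONDITION & SPEC =====
-- Pre_ excludes association lists with duplicate outer keys or duplicate inner keys: those do
-- not represent Python dicts (the argument is a dict of dicts), so A is never run on them.
def Pre_listPOSITIONS (positionsDict : List (String × List (String × String))) : Prop :=
  (positionsDict.map Prod.fst).Nodup ∧ ∀ kv ∈ positionsDict, (kv.2.map Prod.fst).Nodup
instance (positionsDict : List (String × List (String × String))) : Decidable (Pre_listPOSITIONS positionsDict) := by unfold Pre_listPOSITIONS; infer_instance

def pvWitness_listPOSITIONS : (List (String × List (String × String))) :=
  [("A1", [("C", "x")]), ("B2", [("D", "y"), ("S", "z")]), ("C3", [])]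

def Spec_listPOSITIONS (positionsDict : List (String × List (String × String))) (out : List (String × List String)) : Prop := out = listPOSITIONS_alt positionsDict
instance (positionsDict : List (String × List (String × String))) (out : List (String × List String)) : Decidable (Spec_listPOSITIONS positionsDict out) := by unfold Spec_listPOSITIONS; infer_instance

-- ===== CLAIM (what is proved, stated in full; the proofs are below) =====
def Claim_equal_listPOSITIONS : Prop := ∀ (positionsDict : List (String × List (String × String))), Dom_listPOSITIONS positionsDict → Pre_listPOSITIONS positionsDict → Spec_listPOSITIONS positionsDict (listPOSITIONS positionsDict)

-- ===== LEMMAS AND PROOFS =====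

-- the shape every intermediate shipDict has: only three of the nine lists ever change
def pvMk9 (cs ds ss : List String) : List (String × List String) :=
  [("Carrier", cs), ("Battleship1", []), ("Battleship2", []), ("Destroyer", ds),
   ("Submarine", ss), ("PatrolBoat1", []), ("PatrolBoat2", []), ("PatrolBoat3", []),
   ("PatrolBoat4", [])]

lemma pvAddTo_C (cs ds ss : List String) (x : String) :
    pvAddTo (pvMk9 cs ds ss) "Carrier" x = pvMk9 (cs ++ [x]) ds ss := by
  simp [pvAddTo, pvMk9]

lemma pvAddTo_D (cs ds ss : List String) (x : String) :
    pvAddTo (pvMk9 cs ds ss) "Destroyer" x = pvMk9 cs (ds ++ [x]) ss := by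
  simp [pvAddTo, pvMk9]

lemma pvAddTo_S (cs ds ss : List String) (x : String) :
    pvAddTo (pvMk9 cs ds ss) "Submarine" x = pvMk9 cs ds (ss ++ [x]) := by
  simp [pvAddTo, pvMk9]

-- one inner loop: with no duplicate letters, it appends anahtar once per present ship letter
lemma pvInner (a : String) (L : List String) (hL : L.Nodup) (cs ds ss : List String) :
    L.foldl (pvStep a) (pvMk9 cs ds ss)
    = pvMk9 (cs ++ if "C" ∈ L then [a] else [])
            (ds ++ if "D" ∈ L then [a] else [])
            (ss ++ if "S" ∈ L then [a] else []) := by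
  induction L generalizing cs ds ss with
  | nil => simp [pvMk9]
  | cons x t ih =>
    rcases List.nodup_cons.mp hL with ⟨hx, ht⟩
    rw [List.foldl_cons]
    by_cases hC : x = "C"
    · subst hC
      have h1 : pvStep a (pvMk9 cs ds ss) "C" = pvMk9 (cs ++ [a]) ds ss := by
        simp [pvStep, pvAddTo_C]
      rw [h1, ih ht]
      simp [List.mem_cons, hx]
    · by_cases hD : x = "D"
      · subst hD
        have h1 : pvStep a (pvMk9 cs ds ss) "D" = pvMk9 cs (ds ++ [a]) ss := by
          simp [pvStep, pvAddTo_D]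
        rw [h1, ih ht]
        simp [List.mem_cons, hx]
      · by_cases hS : x = "S"
        · subst hS
          have h1 : pvStep a (pvMk9 cs ds ss) "S" = pvMk9 cs ds (ss ++ [a]) := by
            simp [pvStep, pvAddTo_S]
          rw [h1, ih ht]
          simp [List.mem_cons, hx]
        · have h1 : pvStep a (pvMk9 cs ds ss) x = pvMk9 cs ds ss := by
            simp [pvStep, hC, hD, hS]
          rw [h1, ih ht]
          have c1 : ¬ ("C" = x) := fun h => hC h.symm
          have c2 : ¬ ("D" = x) := fun h => hD h.symm
          have c3 : ¬ ("S" = x) := fun h => hS h.symm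
          simp [List.mem_cons, c1, c2, c3]

lemma pvMem_map_fst (v : List (String × String)) (c : String) :
    (c ∈ v.map Prod.fst) ↔ pvHasKey v c = true := by
  simp only [pvHasKey, List.any_eq_true, List.mem_map, beq_iff_eq]

-- the outer loop, with an arbitrary pvMk9 accumulator
lemma pvOuter (pd : List (String × List (String × String)))
    (hpd : ∀ kv ∈ pd, (kv.2.map Prod.fst).Nodup) (cs ds ss : List String) :
    pd.foldl (fun sd kv => (kv.2.map Prod.fst).foldl (pvStep kv.1) sd) (pvMk9 cs ds ss)
    = pvMk9 (cs ++ (pd.filter (fun kv => pvHasKey kv.2 "C")).map Prod.fst)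
            (ds ++ (pd.filter (fun kv => pvHasKey kv.2 "D")).map Prod.fst)
            (ss ++ (pd.filter (fun kv => pvHasKey kv.2 "S")).map Prod.fst) := by
  induction pd generalizing cs ds ss with
  | nil => simp
  | cons kv t ih =>
    rw [List.foldl_cons,
        pvInner kv.1 (kv.2.map Prod.fst) (hpd kv (List.mem_cons_self ..)) cs ds ss,
        ih (fun x hx => hpd x (List.mem_cons_of_mem _ hx))]
    simp only [pvMem_map_fst, List.filter_cons]
    by_cases hC : pvHasKey kv.2 "C" = true <;>
      by_cases hD : pvHasKey kv.2 "D" = true <;>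
        by_cases hS : pvHasKey kv.2 "S" = true <;>
          simp [hC, hD, hS]

-- ===== VERDICT (by name: the statement is the Claim_ definition above) =====
theorem listPOSITIONS_spec : Claim_equal_listPOSITIONS := by
  intro pd _ hpre
  unfold Spec_listPOSITIONS listPOSITIONS listPOSITIONS_alt
  have := pvOuter pd hpre.2 [] [] []
  simpa [pvMk9] using this
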